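-- pv_equiv track=rewrite | github.com/Glitxherrr/glitxherrr-trading-sentinel | Glitxherrr-Trading-Sentinel/core/exhaustion.py | _apply_persistence
-- ===== SOURCE A (Python) =====
-- def _apply_persistence(flags, required=3):
--     count = 0
--     out = []
--
--     for v in flags:
--         if v:
--             count += 1
--         else:
--             count = 0
--
--         out.append(count >= required)
--
--     return out
-- ===== SOURCE B (Python) =====
-- from itertools import groupby
--
--
-- def _apply_persistence(flags, required=3):
--     out = []
--     for key, grp in groupby(flags, key=bool):
--         n = sum(1 for _ in grp)
--         if key:
--             out.extend(i >= required for i in range(1, n + 1))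
--         else:
--             out.extend([0 >= required] * n)
--     return out
-- ===== Notes on version B (the rewrite author's own statement) =====
-- stated objective: alternative
-- what changed: B splits the flags into maximal runs of equal truthiness with itertools.groupby and emits each run's answers in one block (1..L >= required for truthy runs, a constant [0 >= required]*L for falsy runs), instead of A's per-element reset counter.
import Mathlib
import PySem

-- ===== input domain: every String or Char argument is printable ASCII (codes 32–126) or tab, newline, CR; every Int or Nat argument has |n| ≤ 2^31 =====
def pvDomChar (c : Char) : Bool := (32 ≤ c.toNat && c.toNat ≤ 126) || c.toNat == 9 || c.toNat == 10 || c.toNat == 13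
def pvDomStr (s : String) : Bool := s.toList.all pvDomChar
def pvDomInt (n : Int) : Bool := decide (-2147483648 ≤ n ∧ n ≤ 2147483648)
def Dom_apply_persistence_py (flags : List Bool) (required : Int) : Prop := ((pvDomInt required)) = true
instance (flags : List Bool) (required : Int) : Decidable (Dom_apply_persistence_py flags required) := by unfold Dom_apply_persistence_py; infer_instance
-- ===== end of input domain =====

-- B groups the flags into maximal runs and emits each run's answers in one block; A keeps a per-element reset counter. Equivalence is total.

-- ===== PORT A =====
-- A's loop over `flags` with state `count`, appending `count >= required` each step.
def pvAGo (required : Int) (count : Int) (flags : List Bool) : List Bool :=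
  match flags with
  | [] => []
  | v :: rest =>
    let c := if v then count + 1 else 0
    decide (c ≥ required) :: pvAGo required c rest

def apply_persistence_py (flags : List Bool) (required : Int) : List Bool :=
  pvAGo required 0 flags

-- ===== PORT B =====
-- the block for one maximal run: key truthy → [i >= required for i in range(1, n+1)]; falsy → [0 >= required] * n
def pvRunOut (required : Int) (key : Bool) (n : Nat) : List Bool :=
  if key then (PySem.List.pyRange 1 ((n : Int) + 1) 1).map (fun i => decide (i ≥ required))
  else List.replicate n (decide ((0 : Int) ≥ required))

-- groupby(flags, key=bool): peel one maximal run at a time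
def pvBGo (required : Int) (flags : List Bool) : List Bool :=
  match flags with
  | [] => []
  | v :: rest =>
    pvRunOut required v (rest.takeWhile (· == v)).length.succ
      ++ pvBGo required (rest.dropWhile (· == v))
termination_by flags.length
decreasing_by
  simp only [List.length_cons]
  exact Nat.lt_succ_of_le (List.length_dropWhile_le _ _)

def apply_persistence_py_alt (flags : List Bool) (required : Int) : List Bool :=
  pvBGo required flags

-- ===== PRECONDITION & SPEC =====
def Spec_apply_persistence_py (flags : List Bool) (required : Int) (out : List Bool) : Prop := out = apply_persistence_py_alt flags required
instance (flags : List Bool) (required : Int) (out : List Bool) : Decidable (Spec_apply_persistence_py flags required out) := by unfold Spec_apply_persistence_py; infer_instance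

-- ===== CLAIM (what is proved, stated in full; the proofs are below) =====
def Claim_equal_apply_persistence_py : Prop := ∀ (flags : List Bool) (required : Int), Dom_apply_persistence_py flags required → Spec_apply_persistence_py flags required (apply_persistence_py flags required)

-- ===== LEMMAS AND PROOFS =====

-- A on a block of `true`s starting from count c
theorem pvAGo_true_run (required : Int) (L : Nat) : ∀ (c : Int) (rest : List Bool),
    pvAGo required c (List.replicate L true ++ rest)
      = (List.range L).map (fun k : Nat => decide (c + (k : Int) + 1 ≥ required))
        ++ pvAGo required (c + L) rest := by
  induction L with
  | zero => intro c rest; simp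
  | succ L ih =>
    intro c rest
    rw [List.replicate_succ, List.cons_append]
    simp only [pvAGo, if_true]
    rw [ih (c + 1)]
    rw [List.range_succ_eq_map, List.map_cons, List.map_map, List.cons_append]
    refine congrArg₂ _ ?_ (congrArg₂ _ ?_ ?_)
    · simp only [decide_eq_decide]
      push_cast
      omega
    · refine List.map_congr_left fun k _ => ?_
      simp only [Function.comp, decide_eq_decide]
      push_cast
      omega
    · congr 1
      push_cast
      ring

-- A on a nonempty block of `false`s ends with count 0, whatever count it started with
theorem pvAGo_false_run (required c : Int) (L : Nat) (rest : List Bool) :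
    pvAGo required c (List.replicate (L + 1) false ++ rest)
      = List.replicate (L + 1) (decide ((0 : Int) ≥ required)) ++ pvAGo required 0 rest := by
  induction L generalizing c with
  | zero => simp [pvAGo]
  | succ L ih =>
    simp only [List.replicate_succ (n := L + 1), List.cons_append, pvAGo]
    simp only [Bool.false_eq_true, if_false]
    rw [ih 0]

-- after a maximal run the next element (if any) differs from v, so A's count restart is invisible
theorem pvAGo_after_true (required c : Int) (rest : List Bool)
    (h : rest = [] ∨ rest.head? = some false) :
    pvAGo required c rest = pvAGo required 0 rest := by
  cases rest with
  | nil => rfl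
  | cons w ws =>
    rcases h with h | h
    · cases h
    · simp only [List.head?_cons, Option.some.injEq] at h
      subst h
      simp [pvAGo]

theorem takeWhile_eq_replicate (v : Bool) (l : List Bool) :
    l.takeWhile (· == v) = List.replicate (l.takeWhile (· == v)).length v := by
  rw [List.eq_replicate_iff]
  refine ⟨rfl, fun b hb => ?_⟩
  have := List.mem_takeWhile_imp hb
  simpa using this

theorem dropWhile_head (v : Bool) (l : List Bool) :
    l.dropWhile (· == v) = [] ∨ (l.dropWhile (· == v)).head? = some (!v) := by
  cases h : l.dropWhile (· == v) with
  | nil => exact Or.inl rfl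
  | cons w ws =>
    right
    have hw : ¬ (w == v) = true := by
      have := List.head?_dropWhile_not (p := (· == v)) (l := l)
      rw [h] at this
      simpa using this
    simp only [List.head?_cons, Option.some.injEq]
    cases v <;> cases w <;> simp_all

theorem pvMain (required : Int) : ∀ (n : Nat) (flags : List Bool), flags.length ≤ n →
    pvAGo required 0 flags = pvBGo required flags := by
  intro n
  induction n with
  | zero => intro flags h; rw [List.length_eq_zero_iff.mp (Nat.le_zero.mp h), pvAGo, pvBGo]
  | succ n ih =>
    intro flags hlen
    cases flags with
    | nil => rw [pvAGo, pvBGo]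
    | cons v rest =>
      have hsplit : v :: rest
          = List.replicate (rest.takeWhile (· == v)).length.succ v ++ rest.dropWhile (· == v) := by
        conv_lhs => rw [← List.takeWhile_append_dropWhile (p := (· == v)) (l := rest)]
        rw [List.replicate_succ, List.cons_append]
        rw [← takeWhile_eq_replicate]
      have hrec : pvAGo required 0 (rest.dropWhile (· == v)) = pvBGo required (rest.dropWhile (· == v)) := by
        apply ih
        have := List.length_dropWhile_le (· == v) rest
        simp only [List.length_cons] at hlen
        omega
      rw [pvBGo.eq_def]
      simp only []
      conv_lhs => rw [hsplit]
      cases v with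
      | true =>
        rw [pvAGo_true_run]
        have hafter : pvAGo required (0 + ((rest.takeWhile (· == true)).length.succ : Int))
            (rest.dropWhile (· == true)) = pvAGo required 0 (rest.dropWhile (· == true)) := by
          apply pvAGo_after_true
          have := dropWhile_head true rest
          simpa using this
        rw [hafter, hrec, pvRunOut, if_pos rfl]
        congr 1
        rw [PySem.List.pyRange_one]
        have : (((((rest.takeWhile (· == true)).length.succ : Nat) : Int) + 1 - 1)).toNat
            = (rest.takeWhile (· == true)).length.succ := by omega
        rw [this, List.map_map]
        apply List.map_congr_left
        intro k _
        simp only [Function.comp, decide_eq_decide]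
        omega
      | false =>
        rw [show (rest.takeWhile (· == false)).length.succ
              = (rest.takeWhile (· == false)).length + 1 from rfl,
            pvAGo_false_run, hrec, pvRunOut]
        simp

-- ===== VERDICT (by name: the statement is the Claim_ definition above) =====
theorem apply_persistence_py_spec : Claim_equal_apply_persistence_py := by
  intro flags required _
  unfold Spec_apply_persistence_py apply_persistence_py apply_persistence_py_alt
  exact pvMain required flags.length flags le_rfl
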